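-- pv_equiv track=rewrite | github.com/xianiax02/mila_coding_study | 프로그래머스/3/258709. 주사위 고르기/주사위 고르기.py | solution
-- ===== SOURCE A (Python) =====
-- from itertools import combinations
-- from bisect import bisect_left
-- from functools import lru_cache
--
-- def solution(dice):
--     n=len(dice)
--     choices=list(combinations([i for i in range(n)],n//2))
--     wins=[0]*len(choices)
--     answer = []
--     @lru_cache(None)
--     def search(choice):
--         if len(choice)==1:
--             d=dict()
--             for num in dice[choice[0]]:
--                 d[num]=d.get(num,0)+1
--             return d
--         d=dict()
--         prev_results=search(choice[:-1])
--         for s,num1 in prev_results.items():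
--             for num2 in dice[choice[-1]]:
--                 d[s+num2]=d.get(s+num2,0)+num1
--         return d
--     for choicenum, choice in enumerate(choices):
--         a_d=search(choice)
--         b_d=search(tuple(sorted(set(range(n))-set(choice))))
--         b_d=sorted(b_d.items())
--         b_num=[x[0] for x in b_d]
--         b_sum=[b_d[0] for _ in range(len(b_d))]
--         for i in range(1,len(b_d)):
--             b_sum[i]=(b_d[i][0],b_sum[i-1][1]+b_d[i][1])
--         ans=0
--         for k,v in a_d.items():
--             idx=bisect_left(b_num,k)
--             if idx>0:
--                 ans+=b_sum[idx-1][1]*v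
--         wins[choicenum]=ans
--     answer=list(choices[wins.index(max(wins))])
--     answer=sorted([i+1 for i in answer])
--     return answer
-- ===== SOURCE B (Python) =====
-- from itertools import combinations
--
--
-- def solution(dice):
--     n = len(dice)
--
--     def dist(idxs):
--         # sum distribution of the chosen dice, by iterative convolution
--         d = {0: 1}
--         for i in idxs:
--             nd = {}
--             for s, c in d.items():
--                 for x in dice[i]:
--                     nd[s + x] = nd.get(s + x, 0) + c
--             d = nd
--         return sorted(d.items())
--
--     best = None
--     for choice in combinations(range(n), n // 2):
--         rest = [i for i in range(n) if i not in choice]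
--         da = dist(choice)
--         db = dist(rest)
--         # two-pointer merge: count pairs with subset sum strictly greater
--         w = acc = j = 0
--         for sa, ca in da:
--             while j < len(db) and db[j][0] < sa:
--                 acc += db[j][1]
--                 j += 1
--             w += ca * acc
--         if best is None or w > best[0]:
--             best = (w, choice)
--     return sorted(i + 1 for i in best[1])
-- ===== Notes on version B (the rewrite author's own statement) =====
-- stated objective: simpler
-- what changed: Replaces the lru_cache prefix recursion, the prefix-sum array with bisect win counting and the wins array with wins.index(max(wins)) by an iterative dict convolution per subset, a single sorted two-pointer merge counting strict wins, and a running first-max best tracked in the combinations loop.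
-- outside the precondition, e.g. on solution([]): A raises RecursionError, B returns []
import Mathlib
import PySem

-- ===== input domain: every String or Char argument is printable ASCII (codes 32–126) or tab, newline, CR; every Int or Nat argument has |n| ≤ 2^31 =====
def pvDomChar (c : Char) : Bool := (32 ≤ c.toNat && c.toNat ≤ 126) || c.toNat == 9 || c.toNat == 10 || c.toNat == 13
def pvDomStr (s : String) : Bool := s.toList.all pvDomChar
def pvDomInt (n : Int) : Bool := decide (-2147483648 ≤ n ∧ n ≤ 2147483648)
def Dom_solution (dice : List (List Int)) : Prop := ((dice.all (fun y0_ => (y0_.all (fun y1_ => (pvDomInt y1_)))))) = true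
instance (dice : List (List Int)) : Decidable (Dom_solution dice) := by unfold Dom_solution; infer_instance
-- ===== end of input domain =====

-- B is a simpler re-implementation (no lru_cache recursion, no prefix-sum array/bisect,
-- no wins array): per subset it convolves the chosen dice iteratively, counts strict wins
-- by one two-pointer merge of the two sorted distributions, and tracks a running first-max best.

-- shared helper: the identical nested accumulation loop
-- 'for s,c in prev.items(): for x in die: d[s+x] = d.get(s+x,0)+c' present in both sources
def pvConv (prev : PySem.Dict Int Int) (die : List Int) : PySem.Dict Int Int :=
  prev.items.foldl
    (fun d p => die.foldl (fun d x => d.insert (p.1 + x) (d.getD (p.1 + x) 0 + p.2)) d)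
    PySem.Dict.empty

-- ===== PORT A =====
-- 'search(choice)': recursion on choice[:-1]; the lru_cache only memoises and does not
-- change the value, so it is omitted. On the empty tuple Python's search never returns
-- (RecursionError); solution never calls it on one (n ≥ 2 by Pre_), the [] branch is a dummy.
-- dice[i] is ported as pyGetD dice i [] — exact here since every index comes from range(n).
def searchA (dice : List (List Int)) : List Int → PySem.Dict Int Int
  | [] => PySem.Dict.empty
  | c :: cs =>
    if (c :: cs).length == 1 then
      (PySem.List.pyGetD dice (PySem.List.pyGetD (c :: cs) 0 0) []).foldl
        (fun d num => d.insert num (d.getD num 0 + 1)) PySem.Dict.empty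
    else
      pvConv (searchA dice (PySem.List.slice (c :: cs) none (some (-1))))
        (PySem.List.pyGetD dice (PySem.List.pyGetD (c :: cs) (-1) 0) [])
  termination_by l => l.length
  decreasing_by simp [PySem.List.slice_to_neg_one]

-- the b_sum prefix array: '[b_d[0] for _ in range(len(b_d))]' then the index loop
-- (pyGetD with a default is exact: every read index is in range when it is evaluated)
def pvBsum (S : List (Int × Int)) : List (Int × Int) :=
  (PySem.List.pyRange 1 (PySem.List.len S)).foldl
    (fun bs i => PySem.List.pySetD bs i
      ((PySem.List.pyGetD S i (0, 0)).1,
        (PySem.List.pyGetD bs (i - 1) (0, 0)).2 + (PySem.List.pyGetD S i (0, 0)).2))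
    ((PySem.List.pyRange 0 (PySem.List.len S)).map (fun _ => PySem.List.pyGetD S 0 (0, 0)))

-- the body of A's outer loop (everything that ends in 'wins[choicenum] = ans')
def pvWinA (dice : List (List Int)) (n : Int) (choice : List Int) : Int :=
  let a_d := searchA dice choice
  let b_dict := searchA dice
    (PySem.List.sorted
      (PySem.Set.diff (PySem.Set.ofList (PySem.List.pyRange 0 n)) (PySem.Set.ofList choice))
      (fun x => x) false)
  let b_d := PySem.List.sorted2 b_dict.items (fun p => p.1) (fun p => p.2) false
  let b_num := b_d.map (fun p => p.1)
  let b_sum := pvBsum b_d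
  a_d.items.foldl (fun ans kv =>
      let idx := PySem.List.bisectLeft b_num kv.1
      if idx > 0 then ans + (PySem.List.pyGetD b_sum ((idx : Int) - 1) (0, 0)).2 * kv.2
      else ans) 0

-- max(wins) / wins.index(...) are ported in their total .getD forms: exact here because
-- choices is always nonempty and the maximum is a member of wins.
def solution (dice : List (List Int)) : List Int :=
  let n := PySem.List.len dice
  let choices := PySem.List.combinations (PySem.List.pyRange 0 n) ((PySem.Int.floordiv n 2).toNat)
  let wins := (PySem.List.enumerate choices).foldl
    (fun ws p => PySem.List.pySetD ws p.1 (pvWinA dice n p.2))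
    (PySem.List.pyRepeat [0] (PySem.List.len choices))
  let m := (PySem.List.max? wins (fun x => x)).getD 0
  let answer := PySem.List.pyGetD choices (((PySem.List.index? wins m).getD 0 : Nat) : Int) []
  PySem.List.sorted (answer.map (fun i => i + 1)) (fun x => x) false

-- ===== PORT B =====
-- 'dist(idxs)': iterative convolution starting from {0: 1}, then sorted(d.items())
def pvDistDict (dice : List (List Int)) (idxs : List Int) : PySem.Dict Int Int :=
  idxs.foldl (fun d i => pvConv d (PySem.List.pyGetD dice i []))
    (PySem.Dict.ofList [(0, 1)])

def distB (dice : List (List Int)) (idxs : List Int) : List (Int × Int) :=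
  PySem.List.sorted2 (pvDistDict dice idxs).items (fun p => p.1) (fun p => p.2) false

-- B's for/while two-pointer merge: the while loop advancing j is pvAdvance on the
-- remaining suffix of db; the for loop is pvMerge carrying the state (db-suffix, acc, w)
def pvAdvance (sa : Int) : List (Int × Int) → Int → List (Int × Int) × Int
  | [], acc => ([], acc)
  | q :: db, acc => if q.1 < sa then pvAdvance sa db (acc + q.2) else (q :: db, acc)

def pvMerge : List (Int × Int) → List (Int × Int) → Int → Int → Int
  | [], _, _, w => w
  | p :: da, db, acc, w =>
    let r := pvAdvance p.1 db acc
    pvMerge da r.1 r.2 (w + p.2 * r.2)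

def solution_alt (dice : List (List Int)) : List Int :=
  let n := PySem.List.len dice
  let best := (PySem.List.combinations (PySem.List.pyRange 0 n) ((PySem.Int.floordiv n 2).toNat)).foldl
    (fun best choice =>
      let rest := (PySem.List.pyRange 0 n).filter (fun i => !(choice.contains i))
      let da := distB dice choice
      let db := distB dice rest
      let w := pvMerge da db 0 0
      match best with
      | none => some (w, choice)
      | some b => if w > b.1 then some (w, choice) else some b)
    none
  match best with
  | some b => PySem.List.sorted (b.2.map (fun i => i + 1)) (fun x => x) false
  | none => []  -- unreachable: combinations(range(n), n//2) is never empty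

-- ===== PRECONDITION & SPEC =====
-- Pre_ excludes only inputs where A raises: for len(dice) ≤ 1 the n//2 = 0 combination is
-- the empty tuple and A's search(()) recurses forever (RecursionError).
def Pre_solution (dice : List (List Int)) : Prop := 2 ≤ dice.length
instance (dice : List (List Int)) : Decidable (Pre_solution dice) := by unfold Pre_solution; infer_instance
def pvWitness_solution : List (List Int) := [[1, 2], [3]]

def Spec_solution (dice : List (List Int)) (out : List Int) : Prop := out = solution_alt dice
instance (dice : List (List Int)) (out : List Int) : Decidable (Spec_solution dice out) := by unfold Spec_solution; infer_instance

-- ===== CLAIM (what is proved, stated in full; the proofs are below) =====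
def Claim_equal_solution : Prop := ∀ (dice : List (List Int)), Dom_solution dice → Pre_solution dice → Spec_solution dice (solution dice)

-- ===== LEMMAS AND PROOFS =====

theorem pvConv_nodup_keys (prev : PySem.Dict Int Int) (die : List Int) :
    (pvConv prev die).keys.Nodup := by
  unfold pvConv
  generalize prev.items = l
  have H : ∀ (l : List (Int × Int)) (d : PySem.Dict Int Int), d.keys.Nodup →
      (l.foldl (fun d p => die.foldl (fun d x => d.insert (p.1 + x) (d.getD (p.1 + x) 0 + p.2)) d) d).keys.Nodup := by
    intro l
    induction l with
    | nil => intro d hd; simpa using hd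
    | cons p t ih =>
      intro d hd
      simp only [List.foldl_cons]
      exact ih _ (PySem.Dict.nodup_keys_foldl_insert_key die (fun x => p.1 + x) _ d hd)
  exact H l _ (by simp [PySem.Dict.keys_empty])

theorem pvDistDict_nodup_keys (dice : List (List Int)) (idxs : List Int) :
    (pvDistDict dice idxs).keys.Nodup := by
  unfold pvDistDict
  have H : ∀ (l : List Int) (d : PySem.Dict Int Int), d.keys.Nodup →
      (l.foldl (fun d i => pvConv d (PySem.List.pyGetD dice i [])) d).keys.Nodup := by
    intro l
    induction l with
    | nil => intro d hd; simpa using hd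
    | cons i t ih => intro d hd; simp only [List.foldl_cons]; exact ih _ (pvConv_nodup_keys _ _)
  exact H idxs _ (by decide)

theorem base_eq (dice : List (List Int)) (die : List Int) :
    die.foldl (fun d num => d.insert num (d.getD num 0 + 1)) PySem.Dict.empty
      = pvConv (PySem.Dict.ofList [(0, 1)]) die := by
  unfold pvConv
  have h : (PySem.Dict.ofList [((0:Int), (1:Int))]).items = [(0, 1)] := by decide
  rw [h]
  simp only [List.foldl_cons, List.foldl_nil]
  exact PySem.List.foldl_congr_mem die _ _ _ (by intro acc x hx; simp)

theorem searchA_eq_foldl (dice : List (List Int)) (l : List Int) (hl : l ≠ []) :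
    searchA dice l = l.foldl (fun d i => pvConv d (PySem.List.pyGetD dice i []))
      (PySem.Dict.ofList [(0, 1)]) := by
  induction l using List.reverseRecOn with
  | nil => exact absurd rfl hl
  | append_singleton t a ih =>
    cases t with
    | nil =>
      show searchA dice [a] = _
      unfold searchA
      simp only [List.length_cons, List.length_nil, beq_self_eq_true, if_true,
        PySem.List.pyGetD_zero_cons]
      exact base_eq dice _
    | cons b bs =>
      have h2 : (b :: bs) ++ [a] = b :: (bs ++ [a]) := by simp
      rw [h2]
      unfold searchA
      have hlen : ((b :: (bs ++ [a])).length == 1) = false := by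
        simp [List.length_append]
      rw [hlen]
      simp only [Bool.false_eq_true, if_false]
      rw [show (b :: (bs ++ [a])) = (b :: bs) ++ [a] by simp]
      rw [PySem.List.slice_to_neg_one, List.dropLast_concat,
        PySem.List.pyGetD_neg_one_append_singleton]
      rw [ih (by simp), List.foldl_append]
      simp

theorem complement_eq (n : Nat) (ch : List Int) :
    PySem.List.sorted
      (PySem.Set.diff (PySem.Set.ofList (PySem.List.pyRange 0 (n : Int))) (PySem.Set.ofList ch))
      (fun x => x) false
    = (PySem.List.pyRange 0 (n : Int)).filter (fun i => !(ch.contains i)) := by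
  have hrng : PySem.List.pyRange 0 (n : Int) = (List.range n).map (fun k : Nat => (k : Int)) :=
    PySem.List.pyRange_zero_natCast n
  have hnd : (PySem.List.pyRange 0 (n : Int)).Nodup := by
    rw [hrng]
    exact (List.nodup_range).map (fun a b => by exact_mod_cast id)
  rw [PySem.Set.ofList_eq_self_of_nodup _ hnd]
  have hdiff : PySem.Set.diff (PySem.List.pyRange 0 (n : Int)) (PySem.Set.ofList ch)
      = (PySem.List.pyRange 0 (n : Int)).filter (fun i => !(ch.contains i)) := by
    unfold PySem.Set.diff
    apply List.filter_congr
    intro x hx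
    have : (PySem.Set.ofList ch).contains x = ch.contains x := by
      by_cases h : x ∈ ch
      · simp [PySem.Set.contains_eq_listContains, h, PySem.Set.mem_ofList]
      · simp [PySem.Set.contains_eq_listContains, h, PySem.Set.mem_ofList]
    rw [PySem.Set.contains_eq_listContains] at this ⊢
    rw [this]
  rw [hdiff]
  have hpw : List.Pairwise (· < ·) ((PySem.List.pyRange 0 (n : Int)).filter (fun i => !(ch.contains i))) := by
    apply List.Pairwise.filter
    rw [hrng]
    exact (List.pairwise_lt_range).map _ (by intro a b h; exact_mod_cast h)
  apply PySem.List.eq_of_perm_of_pairwise_le_of_injective (fun x : Int => x) (fun a b h => h)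
  · exact PySem.List.sorted_perm _ _ _
  · exact PySem.List.sorted_pairwise _ _
  · exact hpw.imp (fun h => le_of_lt h)

def pvLexB : (Int × Int) → (Int × Int) → Bool :=
  fun a b => decide (a.1 < b.1) || !decide (b.1 < a.1) && decide (a.2 < b.2)

theorem insertBy_fst_pairwise (x : Int × Int) :
    ∀ (ys : List (Int × Int)), (∀ y ∈ ys, y.1 ≠ x.1) →
    List.Pairwise (fun a b : Int × Int => a.1 < b.1) ys →
    List.Pairwise (fun a b : Int × Int => a.1 < b.1) (PySem.List.insertBy pvLexB x ys) := by
  intro ys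
  induction ys with
  | nil => intro _ _; simp [PySem.List.insertBy]
  | cons y t ih =>
    intro hne hpw
    rw [List.pairwise_cons] at hpw
    obtain ⟨hyt, hpt⟩ := hpw
    by_cases hb : pvLexB x y = true
    · have hxy : x.1 < y.1 := by
        unfold pvLexB at hb
        rcases Bool.or_eq_true_iff.mp hb with h | h
        · exact of_decide_eq_true h
        · rcases Bool.and_eq_true_iff.mp h with ⟨h1, _⟩
          have hnyx : ¬ (y.1 < x.1) := by simpa using h1
          rcases lt_trichotomy x.1 y.1 with h' | h' | h'
          · exact h'
          · exact absurd h'.symm (hne y (by simp))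
          · exact absurd h' hnyx
      simp only [PySem.List.insertBy, hb, if_true]
      exact List.pairwise_cons.mpr ⟨by
        intro z hz
        rcases List.mem_cons.mp hz with rfl | hz
        · exact hxy
        · exact lt_trans hxy (hyt z hz), List.pairwise_cons.mpr ⟨hyt, hpt⟩⟩
    · have hyx : y.1 < x.1 := by
        unfold pvLexB at hb
        rcases lt_trichotomy x.1 y.1 with h' | h' | h'
        · simp [h'] at hb
        · exact absurd h'.symm (hne y (by simp))
        · exact h'
      have step : PySem.List.insertBy pvLexB x (y :: t) = y :: PySem.List.insertBy pvLexB x t := by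
        simp [PySem.List.insertBy, hb]
      rw [step]
      refine List.pairwise_cons.mpr ⟨?_, ih (fun z hz => hne z (by simp [hz])) hpt⟩
      intro z hz
      rcases (PySem.List.insertBy_mem_iff _ _ _ _).mp hz with rfl | hz
      · exact hyx
      · exact hyt z hz

theorem sorted2_fst_pairwise (xs : List (Int × Int)) (hnd : (xs.map Prod.fst).Nodup) :
    List.Pairwise (fun a b : Int × Int => a.1 < b.1)
      (PySem.List.sorted2 xs (fun p => p.1) (fun p => p.2) false) := by
  have H : ∀ (l : List (Int × Int)) (acc : List (Int × Int)),
      List.Pairwise (fun a b : Int × Int => a.1 < b.1) acc →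
      (∀ y ∈ acc, ∀ x ∈ l, y.1 ≠ x.1) → (l.map Prod.fst).Nodup →
      List.Pairwise (fun a b : Int × Int => a.1 < b.1)
        (l.foldl (fun acc x => PySem.List.insertBy pvLexB x acc) acc) := by
    intro l
    induction l with
    | nil => intro acc h _ _; simpa using h
    | cons x t ih =>
      intro acc hacc hsep hnd
      simp only [List.map_cons, List.nodup_cons] at hnd
      simp only [List.foldl_cons]
      apply ih
      · exact insertBy_fst_pairwise x acc (fun y hy => hsep y hy x (by simp)) hacc
      · intro y hy z hz
        rcases (PySem.List.insertBy_mem_iff _ _ _ _).mp hy with rfl | hy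
        · intro he
          exact hnd.1 (he ▸ List.mem_map_of_mem hz)
        · exact hsep y hy z (by simp [hz])
      · exact hnd.2
  have : PySem.List.sorted2 xs (fun p => p.1) (fun p => p.2) false
      = xs.foldl (fun acc x => PySem.List.insertBy pvLexB x acc) [] := rfl
  rw [this]
  exact H xs [] (by simp) (by simp) hnd

theorem pvBsum_inv (S : List (Int × Int)) (m : Nat) (hm1 : 1 ≤ m) (hmL : m ≤ S.length) :
    ((PySem.List.pyRange 1 (m : Int)).foldl
      (fun bs i => PySem.List.pySetD bs i
        ((PySem.List.pyGetD S i (0, 0)).1,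
          (PySem.List.pyGetD bs (i - 1) (0, 0)).2 + (PySem.List.pyGetD S i (0, 0)).2))
      ((PySem.List.pyRange 0 (S.length : Int)).map (fun _ => PySem.List.pyGetD S 0 (0, 0)))).length = S.length
    ∧ ∀ j : Nat, j < S.length →
      ((PySem.List.pyRange 1 (m : Int)).foldl
        (fun bs i => PySem.List.pySetD bs i
          ((PySem.List.pyGetD S i (0, 0)).1,
            (PySem.List.pyGetD bs (i - 1) (0, 0)).2 + (PySem.List.pyGetD S i (0, 0)).2))
        ((PySem.List.pyRange 0 (S.length : Int)).map (fun _ => PySem.List.pyGetD S 0 (0, 0)))).getD j (0, 0)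
      = if j < m then ((S.getD j (0, 0)).1, ((S.take (j + 1)).map (fun p => p.2)).sum)
        else S.getD 0 (0, 0) := by
  have hL0 : 0 < S.length := lt_of_lt_of_le hm1 hmL
  have hlen0 : ((PySem.List.pyRange 0 (S.length : Int)).map
      (fun _ => PySem.List.pyGetD S 0 (0, 0))).length = S.length := by
    rw [List.length_map, PySem.List.pyRange_zero_natCast, List.length_map, List.length_range]
  have hval0 : ((S.getD 0 (0, 0)).1, ((S.take 1).map (fun p => p.2)).sum) = S.getD 0 (0, 0) := by
    have h1 : S.take 1 = [S.getD 0 (0, 0)] := by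
      rw [List.take_succ]
      simp [List.take_zero, List.getElem?_eq_getElem hL0]
    rw [h1]
    simp
  induction m with
  | zero => omega
  | succ m ih =>
    by_cases hm : m = 0
    · subst hm
      have : PySem.List.pyRange 1 ((1 : Nat) : Int) = [] := PySem.List.pyRange_one_eq_nil (by simp)
      rw [show (((0:Nat)+1 : Nat) : Int) = ((1:Nat) : Int) by norm_num, this]
      simp only [List.foldl_nil]
      refine ⟨hlen0, ?_⟩
      intro j hj
      have : ((PySem.List.pyRange 0 (S.length : Int)).map
          (fun _ => PySem.List.pyGetD S 0 (0, 0))).getD j (0, 0) = PySem.List.pyGetD S 0 (0, 0) := by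
        have hj' : j < ((PySem.List.pyRange 0 (S.length : Int)).map
            (fun _ => PySem.List.pyGetD S 0 (0, 0))).length := by rw [hlen0]; exact hj
        rw [List.getD_eq_getElem _ _ hj', List.getElem_map]
      rw [this, PySem.List.pyGetD_zero]
      by_cases hj0 : j < 1
      · have : j = 0 := by omega
        subst this
        rw [if_pos (by omega), hval0]
      · rw [if_neg hj0]
    · have hm1' : 1 ≤ m := by omega
      have hmL' : m ≤ S.length := by omega
      obtain ⟨ihlen, ihget⟩ := ih hm1' hmL'
      have hrange : PySem.List.pyRange 1 ((m + 1 : Nat) : Int)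
          = PySem.List.pyRange 1 (m : Int) ++ [(m : Int)] := by
        rw [show ((m + 1 : Nat) : Int) = (m : Int) + 1 by push_cast; ring]
        exact PySem.List.pyRange_one_succ_right (by exact_mod_cast hm1')
      rw [hrange, List.foldl_append, List.foldl_cons, List.foldl_nil]
      set ws := (PySem.List.pyRange 1 (m : Int)).foldl
        (fun bs i => PySem.List.pySetD bs i
          ((PySem.List.pyGetD S i (0, 0)).1,
            (PySem.List.pyGetD bs (i - 1) (0, 0)).2 + (PySem.List.pyGetD S i (0, 0)).2))
        ((PySem.List.pyRange 0 (S.length : Int)).map (fun _ => PySem.List.pyGetD S 0 (0, 0))) with hws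
      have hmlt : m < S.length := by omega
      -- the written pair is the value at index m
      have hgSm : PySem.List.pyGetD S (m : Int) (0, 0) = S.getD m (0, 0) := PySem.List.pyGetD_natCast S m _
      have hcast : ((m : Int) - 1) = ((m - 1 : Nat) : Int) := by
        have : 1 ≤ m := hm1'
        push_cast [Nat.cast_sub this]
        ring
      have hprev : PySem.List.pyGetD ws ((m : Int) - 1) (0, 0)
          = ((S.getD (m - 1) (0, 0)).1, ((S.take m).map (fun p => p.2)).sum) := by
        rw [hcast, PySem.List.pyGetD_natCast]
        have hj1 : m - 1 < S.length := by omega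
        have := ihget (m - 1) hj1
        rw [if_pos (by omega)] at this
        have hmm : m - 1 + 1 = m := by omega
        rw [hmm] at this
        exact this
      have hts : S.take (m + 1) = S.take m ++ [S.getD m (0, 0)] := by
        rw [List.take_succ, List.getElem?_eq_getElem hmlt]
        rw [List.getD_eq_getElem _ _ hmlt]
        rfl
      have htake : (S.take (m + 1)).map (fun p => p.2)
          = (S.take m).map (fun p => p.2) ++ [(S.getD m (0, 0)).2] := by
        rw [hts, List.map_append]
        rfl
      constructor
      · rw [PySem.List.length_pySetD]; exact ihlen
      · intro j hj
        have hjws : m < ws.length := by rw [ihlen]; exact hmlt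
        have hset := PySem.List.pyGetD_pySetD_natCast ws m j
          ((PySem.List.pyGetD S (m : Int) (0, 0)).1,
            (PySem.List.pyGetD ws ((m : Int) - 1) (0, 0)).2 + (PySem.List.pyGetD S (m : Int) (0, 0)).2)
          (0, 0) hjws
        rw [← PySem.List.pyGetD_natCast (PySem.List.pySetD ws (m : Int) _) j (0, 0)]
        rw [hset]
        by_cases hjm : j = m
        · subst hjm
          rw [if_pos rfl, if_pos (by omega), hgSm, hprev, htake]
          simp [List.sum_append]
        · rw [if_neg hjm, PySem.List.pyGetD_natCast, ihget j hj]
          by_cases hjlt : j < m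
          · rw [if_pos hjlt, if_pos (by omega)]
          · rw [if_neg hjlt, if_neg (by omega)]

theorem pvBsum_getD (S : List (Int × Int)) (j : Nat) (hj : j < S.length) :
    PySem.List.pyGetD (pvBsum S) (j : Int) (0, 0)
      = ((S[j]).1, ((S.take (j + 1)).map (fun p => p.2)).sum) := by
  have hL : 1 ≤ S.length := by omega
  have := pvBsum_inv S S.length hL le_rfl
  unfold pvBsum
  rw [PySem.List.len_eq, PySem.List.pyGetD_natCast]
  rw [this.2 j hj, if_pos hj]
  rw [List.getD_eq_getElem _ _ hj]
theorem bisect_item (S : List (Int × Int)) (hpw : List.Pairwise (fun a b : Int × Int => a.1 < b.1) S)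
    (k v : Int) :
    (if PySem.List.bisectLeft (S.map (fun p => p.1)) k > 0 then
        (PySem.List.pyGetD (pvBsum S) ((PySem.List.bisectLeft (S.map (fun p => p.1)) k : Int) - 1) (0, 0)).2 * v
      else 0)
    = v * ((S.filter (fun q => decide (q.1 < k))).map (fun q => q.2)).sum := by
  have hpw' : List.Pairwise (fun a b : Int => a ≤ b) (S.map (fun p => p.1)) :=
    List.pairwise_map.mpr (hpw.imp (fun h => le_of_lt h))
  obtain ⟨hle, hlt, hge⟩ := PySem.List.bisectLeft_spec (S.map (fun p => p.1)) k hpw'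
  set i := PySem.List.bisectLeft (S.map (fun p => p.1)) k with hi
  rw [List.length_map] at hle
  have hiS : i ≤ S.length := hle
  have hfilter : S.filter (fun q => decide (q.1 < k)) = S.take i := by
    conv_lhs => rw [← List.take_append_drop i S]
    rw [List.filter_append]
    have h1 : (S.take i).filter (fun q => decide (q.1 < k)) = S.take i := by
      rw [List.filter_eq_self]
      intro x hx
      obtain ⟨j, hj, hxe⟩ := List.mem_iff_getElem.mp hx
      have hj' : j < i := by
        have := hj
        rw [List.length_take] at this
        omega
      have hjS : j < S.length := by omega
      have := hlt j (by rw [List.length_map]; omega) hj'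
      rw [List.getElem_map] at this
      rw [← hxe, List.getElem_take]
      exact decide_eq_true this
    have h2 : (S.drop i).filter (fun q => decide (q.1 < k)) = [] := by
      rw [List.filter_eq_nil_iff]
      intro x hx
      obtain ⟨j, hj, hxe⟩ := List.mem_iff_getElem.mp hx
      have hjS : i + j < S.length := by
        rw [List.length_drop] at hj
        omega
      have := hge (i + j) (by rw [List.length_map]; omega) (by omega)
      rw [List.getElem_map] at this
      rw [← hxe, List.getElem_drop]
      simp only [decide_eq_true_eq]
      omega
    rw [h1, h2, List.append_nil]
  by_cases hi0 : i > 0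
  · rw [if_pos hi0]
    have hcast : ((i : Int) - 1) = ((i - 1 : Nat) : Int) := by
      push_cast [Nat.cast_sub (by omega : 1 ≤ i)]
      ring
    rw [hcast, pvBsum_getD S (i - 1) (by omega)]
    have : i - 1 + 1 = i := by omega
    rw [this, hfilter]
    ring
  · rw [if_neg hi0]
    have : i = 0 := by omega
    rw [hfilter, this]
    simp

theorem pvAdvance_spec (sa : Int) : ∀ (db : List (Int × Int)) (acc : Int),
    List.Pairwise (fun a b : Int × Int => a.1 < b.1) db →
    ∃ D db', db = D ++ db' ∧ pvAdvance sa db acc = (db', acc + (D.map (fun q => q.2)).sum) ∧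
      (∀ d ∈ D, d.1 < sa) ∧ (∀ d ∈ db', ¬ (d.1 < sa)) := by
  intro db
  induction db with
  | nil => exact fun acc _ => ⟨[], [], by simp, by simp [pvAdvance], by simp, by simp⟩
  | cons q t ih =>
    intro acc hpw
    rw [List.pairwise_cons] at hpw
    obtain ⟨hq, hpt⟩ := hpw
    by_cases h : q.1 < sa
    · obtain ⟨D, db', he, hadv, hD, hdb'⟩ := ih (acc + q.2) hpt
      refine ⟨q :: D, db', by simp [he], ?_, ?_, hdb'⟩
      · rw [show pvAdvance sa (q :: t) acc = pvAdvance sa t (acc + q.2) by simp [pvAdvance, h],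
          hadv]
        simp only [List.map_cons, List.sum_cons]
        congr 1
        ring
      · intro d hd
        rcases List.mem_cons.mp hd with rfl | hd
        · exact h
        · exact hD d hd
    · refine ⟨[], q :: t, by simp, by simp [pvAdvance, h], by simp, ?_⟩
      intro d hd
      rcases List.mem_cons.mp hd with rfl | hd
      · exact h
      · intro hlt
        exact h (lt_trans (hq d hd) hlt)

theorem pvMerge_spec : ∀ (da C db : List (Int × Int)) (w : Int),
    List.Pairwise (fun a b : Int × Int => a.1 < b.1) da →
    List.Pairwise (fun a b : Int × Int => a.1 < b.1) (C ++ db) →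
    (∀ a ∈ da, ∀ c ∈ C, c.1 < a.1) →
    pvMerge da db ((C.map (fun q => q.2)).sum) w
      = w + (da.map (fun p => p.2 *
          ((((C ++ db).filter (fun q => decide (q.1 < p.1))).map (fun q => q.2)).sum))).sum := by
  intro da
  induction da with
  | nil => intro C db w _ _ _; simp [pvMerge]
  | cons p da' ih =>
    intro C db w hpda hpcdb hsep
    rw [List.pairwise_cons] at hpda
    obtain ⟨hpda1, hpda'⟩ := hpda
    have hpdb : List.Pairwise (fun a b : Int × Int => a.1 < b.1) db :=
      (List.pairwise_append.mp hpcdb).2.1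
    obtain ⟨D, db', he, hadv, hD, hdb'⟩ := pvAdvance_spec p.1 db ((C.map (fun q => q.2)).sum) hpdb
    have hmerge : pvMerge (p :: da') db ((C.map (fun q => q.2)).sum) w
        = pvMerge da' db' (((C ++ D).map (fun q => q.2)).sum)
            (w + p.2 * (((C ++ D).map (fun q => q.2)).sum)) := by
      show pvMerge da' (pvAdvance p.1 db ((C.map (fun q => q.2)).sum)).1
          (pvAdvance p.1 db ((C.map (fun q => q.2)).sum)).2
          (w + p.2 * (pvAdvance p.1 db ((C.map (fun q => q.2)).sum)).2) = _
      rw [hadv]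
      simp [List.sum_append]
    rw [hmerge]
    have hassoc : C ++ db = (C ++ D) ++ db' := by rw [he, List.append_assoc]
    have hsep' : ∀ a ∈ da', ∀ c ∈ C ++ D, c.1 < a.1 := by
      intro a ha c hc
      rcases List.mem_append.mp hc with hc | hc
      · exact hsep a (List.mem_cons_of_mem _ ha) c hc
      · exact lt_trans (hD c hc) (hpda1 a ha)
    have hih := ih (C ++ D) db' (w + p.2 * (((C ++ D).map (fun q => q.2)).sum)) hpda'
      (by rw [← hassoc]; exact hpcdb) hsep'
    rw [hih]
    have hheadfilt : (C ++ db).filter (fun q => decide (q.1 < p.1)) = C ++ D := by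
      rw [hassoc, List.filter_append, List.filter_append]
      have h1 : C.filter (fun q => decide (q.1 < p.1)) = C := by
        rw [List.filter_eq_self]
        intro c hc
        exact decide_eq_true (hsep p (List.mem_cons_self) c hc)
      have h2 : D.filter (fun q => decide (q.1 < p.1)) = D := by
        rw [List.filter_eq_self]
        intro c hc
        exact decide_eq_true (hD c hc)
      have h3 : db'.filter (fun q => decide (q.1 < p.1)) = [] := by
        rw [List.filter_eq_nil_iff]
        intro c hc
        simpa using hdb' c hc
      rw [h1, h2, h3, List.append_nil]
    have hbodyeq : ∀ a ∈ da',
        a.2 * ((((C ++ D) ++ db').filter (fun q => decide (q.1 < a.1))).map (fun q => q.2)).sum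
        = a.2 * (((C ++ db).filter (fun q => decide (q.1 < a.1))).map (fun q => q.2)).sum := by
      intro a _
      rw [hassoc]
    rw [List.map_congr_left hbodyeq]
    rw [List.map_cons, List.sum_cons, hheadfilt]
    ring

theorem winA_eq_winB (dice : List (List Int)) (ch : List Int) (hch : ch ≠ [])
    (hcomp : (PySem.List.pyRange 0 (dice.length : Int)).filter (fun i => !(ch.contains i)) ≠ []) :
    pvWinA dice (PySem.List.len dice) ch
      = pvMerge (distB dice ch)
          (distB dice ((PySem.List.pyRange 0 (dice.length : Int)).filter (fun i => !(ch.contains i))))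
          0 0 := by
  unfold pvWinA
  rw [PySem.List.len_eq]
  set comp := (PySem.List.pyRange 0 (dice.length : Int)).filter (fun i => !(ch.contains i)) with hcompdef
  have ha : searchA dice ch = pvDistDict dice ch := by
    rw [searchA_eq_foldl dice ch hch]; rfl
  have hb : searchA dice
      (PySem.List.sorted
        (PySem.Set.diff (PySem.Set.ofList (PySem.List.pyRange 0 ((dice.length : Nat) : Int)))
          (PySem.Set.ofList ch)) (fun x => x) false) = pvDistDict dice comp := by
    rw [complement_eq dice.length ch, ← hcompdef, searchA_eq_foldl dice comp hcomp]; rfl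
  rw [ha, hb]
  have hnda : ((pvDistDict dice ch).items.map Prod.fst).Nodup := by
    simpa [PySem.Dict.keys] using pvDistDict_nodup_keys dice ch
  have hndb : ((pvDistDict dice comp).items.map Prod.fst).Nodup := by
    simpa [PySem.Dict.keys] using pvDistDict_nodup_keys dice comp
  have hpwa := sorted2_fst_pairwise (pvDistDict dice ch).items hnda
  have hpwb := sorted2_fst_pairwise (pvDistDict dice comp).items hndb
  set S := PySem.List.sorted2 (pvDistDict dice comp).items (fun p => p.1) (fun p => p.2) false with hS
  set Sa := PySem.List.sorted2 (pvDistDict dice ch).items (fun p => p.1) (fun p => p.2) false with hSa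
  have hperm : S.Perm (pvDistDict dice comp).items := PySem.List.sorted2_perm _ _ _ _
  have hperma : Sa.Perm (pvDistDict dice ch).items := PySem.List.sorted2_perm _ _ _ _
  -- A's accumulating loop is the nested sum over the unsorted items
  have hbody : (pvDistDict dice ch).items.foldl (fun ans kv =>
      if PySem.List.bisectLeft (S.map (fun p => p.1)) kv.1 > 0 then
        ans + (PySem.List.pyGetD (pvBsum S) ((PySem.List.bisectLeft (S.map (fun p => p.1)) kv.1 : Int) - 1) (0, 0)).2 * kv.2
      else ans) 0
      = (pvDistDict dice ch).items.foldl (fun ans kv => ans +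
          (if PySem.List.bisectLeft (S.map (fun p => p.1)) kv.1 > 0 then
            (PySem.List.pyGetD (pvBsum S) ((PySem.List.bisectLeft (S.map (fun p => p.1)) kv.1 : Int) - 1) (0, 0)).2 * kv.2
          else 0)) 0 := by
    apply PySem.List.foldl_congr_mem
    intro acc x _
    split_ifs <;> ring
  rw [hbody, PySem.List.foldl_add, zero_add]
  -- B's merge is the same nested sum over the sorted items
  have hm := pvMerge_spec Sa [] S 0 hpwa (by simpa using hpwb) (by simp)
  have hz : ((([] : List (Int × Int)).map (fun q => q.2)).sum) = 0 := rfl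
  rw [hz] at hm
  rw [show distB dice ch = Sa from rfl, show distB dice comp = S from rfl, hm, zero_add]
  have houter : ∀ kv ∈ (pvDistDict dice ch).items,
      (if PySem.List.bisectLeft (S.map (fun p => p.1)) kv.1 > 0 then
        (PySem.List.pyGetD (pvBsum S) ((PySem.List.bisectLeft (S.map (fun p => p.1)) kv.1 : Int) - 1) (0, 0)).2 * kv.2
      else 0)
      = kv.2 * (((([] : List (Int × Int)) ++ S).filter (fun q => decide (q.1 < kv.1))).map (fun q => q.2)).sum := by
    intro kv _
    rw [List.nil_append, bisect_item S hpwb kv.1 kv.2]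
  rw [List.map_congr_left houter]
  exact (List.Perm.sum_eq (hperma.map _)).symm
theorem wins_eq_map (g : List Int → Int) :
    ∀ (l : List (List Int)) (k : Nat) (ws : List Int), ws.length = k + l.length →
    (PySem.List.enumerate l (k : Int)).foldl (fun ws p => PySem.List.pySetD ws p.1 (g p.2)) ws
      = ws.take k ++ l.map g := by
  intro l
  induction l with
  | nil =>
    intro k ws hlen
    rw [PySem.List.enumerate_nil]
    simp only [List.foldl_nil, List.map_nil, List.append_nil]
    rw [List.take_of_length_le (by simp at hlen; omega)]
  | cons x t ih =>
    intro k ws hlen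
    rw [PySem.List.enumerate_cons, List.foldl_cons]
    have hk : k < ws.length := by simp at hlen; omega
    have hset : PySem.List.pySetD ws (k : Int) (g x) = ws.set k (g x) :=
      PySem.List.pySetD_natCast ws k (g x)
    have hcast : ((k : Int) + 1) = ((k + 1 : Nat) : Int) := by push_cast; ring
    rw [hset, hcast, ih (k + 1) (ws.set k (g x)) (by simp at hlen ⊢; omega)]
    have hsete : ws.set k (g x) = ws.take k ++ g x :: ws.drop (k + 1) := by
      rw [List.set_eq_take_append_cons_drop, if_pos hk]
    rw [hsete]
    rw [List.take_append]
    rw [List.take_of_length_le (by rw [List.length_take]; omega)]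
    rw [List.length_take]
    have h1 : min k ws.length = k := by omega
    rw [h1]
    have h2 : k + 1 - k = 1 := by omega
    rw [h2]
    simp

def IsFirstMax (f : List Int → Int) (l : List (List Int)) (e : List Int) : Prop :=
  ∃ j, ∃ h : j < l.length, e = l[j] ∧ (∀ i (hi : i < l.length), f l[i] ≤ f (l[j])) ∧
    (∀ i (hi : i < j), f (l[i]'(Nat.lt_trans hi h)) < f (l[j]))

theorem firstmax_unique (f : List Int → Int) (l : List (List Int)) (e1 e2 : List Int)
    (h1 : IsFirstMax f l e1) (h2 : IsFirstMax f l e2) : e1 = e2 := by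
  obtain ⟨j1, hj1, he1, hle1, hlt1⟩ := h1
  obtain ⟨j2, hj2, he2, hle2, hlt2⟩ := h2
  rcases Nat.lt_trichotomy j1 j2 with h | h | h
  · exact absurd (hle1 j2 hj2) (not_le.mpr (hlt2 j1 h))
  · subst h; rw [he1, he2]
  · exact absurd (hle2 j1 hj1) (not_le.mpr (hlt1 j2 h))

theorem runbest_aux (f : List Int → Int) :
    ∀ (t : List (List Int)) (e : List Int),
    ∃ e', t.foldl (fun best ch => match best with
        | none => some (f ch, ch)
        | some b => if f ch > b.1 then some (f ch, ch) else some b)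
      (some (f e, e)) = some (f e', e') ∧ IsFirstMax f (e :: t) e' := by
  intro t
  induction t with
  | nil =>
    intro e
    refine ⟨e, rfl, 0, by simp, rfl, ?_, by omega⟩
    intro i hi
    have h0 : i = 0 := by simp at hi; omega
    subst h0
    simp
  | cons x t' ih =>
    intro e
    simp only [List.foldl_cons]
    by_cases hfx : f x > f e
    · rw [if_pos hfx]
      obtain ⟨e', hfold, j, hj, he', hle, hlt⟩ := ih x
      refine ⟨e', hfold, j + 1, by simpa using Nat.succ_lt_succ hj, by simpa using he', ?_, ?_⟩
      · intro i hi
        match i with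
        | 0 => exact le_of_lt (lt_of_lt_of_le hfx (by simpa using hle 0 (by simp)))
        | Nat.succ i' =>
          have hi2 : i' < (x :: t').length := by simp at hi ⊢; omega
          simpa using hle i' hi2
      · intro i hi
        match i with
        | 0 =>
          have h0 : f ((x :: t')[0]) ≤ f ((x :: t')[j]) := hle 0 (by simp)
          simpa using lt_of_lt_of_le hfx (by simpa using h0)
        | Nat.succ i' => simpa using hlt i' (by omega)
    · rw [if_neg hfx]
      have hxe : f x ≤ f e := by omega
      obtain ⟨e', hfold, j, hj, he', hle, hlt⟩ := ih e
      by_cases hj0 : j = 0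
      · subst hj0
        have hee : e' = e := by simpa using he'
        subst hee
        refine ⟨e', hfold, 0, by simp, by simp, ?_, by omega⟩
        intro i hi
        match i with
        | 0 => simp
        | 1 => simpa using hxe
        | Nat.succ (Nat.succ i') =>
          have := hle (i' + 1) (by simp at hi ⊢; omega)
          simpa using this
      · obtain ⟨j', rfl⟩ : ∃ j', j = j' + 1 := ⟨j - 1, by omega⟩
        have hj' : j' < t'.length := by simp at hj; omega
        have he'' : e' = t'[j'] := by simpa using he'
        have hlej : ∀ i (hi : i < t'.length), f (t'[i]) ≤ f (t'[j']) := by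
          intro i hi
          have := hle (i + 1) (by simp; omega)
          simpa using this
        have hle0 : f e ≤ f (t'[j']) := by simpa using hle 0 (by simp)
        have hlt0 : f e < f (t'[j']) := by simpa using hlt 0 (by omega)
        have hltj : ∀ i (hi : i < j'), f (t'[i]) < f (t'[j']) := by
          intro i hi
          have := hlt (i + 1) (by omega)
          simpa using this
        refine ⟨e', hfold, j' + 2, by simp; omega, by simpa using he'', ?_, ?_⟩
        · intro i hi
          match i with
          | 0 => simpa using hle0
          | 1 => simpa using le_trans hxe hle0
          | Nat.succ (Nat.succ i') =>
            have hi2 : i' < t'.length := by simp at hi; omega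
            simpa using hlej i' hi2
        · intro i hi
          match i with
          | 0 => simpa using hlt0
          | 1 => simpa using lt_of_le_of_lt hxe hlt0
          | Nat.succ (Nat.succ i') =>
            have hi2 : i' < j' := by omega
            simpa using hltj i' hi2
theorem runbest_spec (f : List Int → Int) (l : List (List Int)) (hl : l ≠ []) :
    ∃ e, l.foldl (fun best ch => match best with
        | none => some (f ch, ch)
        | some b => if f ch > b.1 then some (f ch, ch) else some b)
      (none : Option (Int × List Int)) = some (f e, e) ∧ IsFirstMax f l e := by
  match l, hl with
  | c :: t, _ =>
    simp only [List.foldl_cons]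
    exact runbest_aux f t c
theorem pickA_spec (f : List Int → Int) (l : List (List Int)) (hl : l ≠ []) :
    IsFirstMax f l
      (PySem.List.pyGetD l
        (((PySem.List.index? (l.map f) ((PySem.List.max? (l.map f) (fun x => x)).getD 0)).getD 0 : Nat) : Int)
        []) := by
  match l, hl with
  | c :: t, _ =>
    rw [List.map_cons, PySem.List.max?_id_cons]
    set M := (t.map f).foldl max (f c) with hM
    have hgd : (some M).getD 0 = M := rfl
    rw [hgd]
    have hMmem : M ∈ f c :: t.map f := by
      rcases PySem.List.foldl_max_mem (t.map f) (f c) with h | h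
      · rw [hM, h]; simp
      · rw [hM]; exact List.mem_cons_of_mem _ h
    have hub : ∀ y ∈ f c :: t.map f, y ≤ M := by
      intro y hy
      rcases List.mem_cons.mp hy with rfl | hy
      · exact (PySem.List.le_foldl_max (t.map f) (f c)).1
      · exact (PySem.List.le_foldl_max (t.map f) (f c)).2 y hy
    unfold PySem.List.index?
    cases hidx : List.idxOf? M (f c :: t.map f) with
    | none => exact absurd hMmem (List.idxOf?_eq_none_iff.mp hidx)
    | some j =>
      obtain ⟨hj, hwsj, hprev⟩ := List.idxOf?_eq_some_iff.mp hidx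
      have hjl : j < (c :: t).length := by
        have := hj
        rw [show (f c :: t.map f) = (c :: t).map f by simp] at this
        rw [List.length_map] at this
        exact this
      have hget : PySem.List.pyGetD (c :: t) (((some j).getD 0 : Nat) : Int) [] = (c :: t)[j] := by
        have : ((some j).getD 0 : Nat) = j := rfl
        rw [this, PySem.List.pyGetD_natCast, List.getD_eq_getElem _ _ hjl]
      rw [hget]
      have hwseq : (f c :: t.map f) = (c :: t).map f := by simp
      have hwsget : ∀ i (hi : i < (c :: t).length), (f c :: t.map f)[i]'(by rw [hwseq, List.length_map]; exact hi) = f ((c :: t)[i]) := by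
        intro i hi
        simp only [hwseq, List.getElem_map]
      refine ⟨j, hjl, rfl, ?_, ?_⟩
      · intro i hi
        have h1 : f ((c :: t)[i]) ≤ M := by
          rw [← hwsget i hi]
          exact hub _ (List.getElem_mem _)
        have h2 : f ((c :: t)[j]) = M := by rw [← hwsget j hjl]; exact hwsj
        rw [h2]; exact h1
      · intro i hi
        have hil : i < (c :: t).length := Nat.lt_trans hi hjl
        have h1 : f ((c :: t)[i]) ≤ M := by
          rw [← hwsget i hil]
          exact hub _ (List.getElem_mem _)
        have hne : f ((c :: t)[i]) ≠ M := by
          rw [← hwsget i hil]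
          exact fun he => hprev i hi he
        have h2 : f ((c :: t)[j]) = M := by rw [← hwsget j hjl]; exact hwsj
        rw [h2]
        exact lt_of_le_of_ne h1 hne

-- ===== VERDICT (by name: the statement is the Claim_ definition above) =====
theorem solution_spec : Claim_equal_solution := by
  intro dice _hdom hpre
  unfold Spec_solution
  have hL : 2 ≤ dice.length := hpre
  show solution dice = solution_alt dice
  simp only [solution, solution_alt, PySem.List.len_eq]
  set r := (PySem.Int.floordiv (dice.length : Int) 2).toNat with hrdef
  have hr : r = dice.length / 2 := by
    rw [hrdef, show ((2 : Int)) = ((2 : Nat) : Int) by norm_num, PySem.Int.floordiv_natCast]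
    exact Int.toNat_natCast _
  have hr1 : 1 ≤ r := by omega
  have hrL : r < dice.length := by omega
  set rng := PySem.List.pyRange 0 (dice.length : Int) with hrngdef
  have hrngeq : rng = (List.range dice.length).map (fun k : Nat => (k : Int)) :=
    PySem.List.pyRange_zero_natCast dice.length
  have hrnglen : rng.length = dice.length := by rw [hrngeq, List.length_map, List.length_range]
  have hrngnd : rng.Nodup := by
    rw [hrngeq]
    exact (List.nodup_range).map (fun a b h => by exact_mod_cast h)
  set choices := PySem.List.combinations rng r with hcdef
  have hchoices_ne : choices ≠ [] := by
    apply List.ne_nil_of_mem (a := rng.take r)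
    rw [hcdef, PySem.List.mem_combinations_iff]
    exact ⟨List.take_sublist _ _, by rw [List.length_take]; omega⟩
  have hmem : ∀ ch ∈ choices, ch ≠ [] ∧ rng.filter (fun i => !(ch.contains i)) ≠ [] := by
    intro ch hch
    rw [hcdef, PySem.List.mem_combinations_iff] at hch
    obtain ⟨hsub, hlen⟩ := hch
    constructor
    · intro he; rw [he] at hlen; simp at hlen; omega
    · intro he
      rw [List.filter_eq_nil_iff] at he
      have hsubset : rng ⊆ ch := by
        intro i hi
        have h0 : ch.contains i = true := by simpa using he i hi
        exact List.contains_iff_mem.mp h0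
      have h1 : rng.toFinset.card = dice.length := by
        rw [List.toFinset_card_of_nodup hrngnd, hrnglen]
      have h2 : rng.toFinset ⊆ ch.toFinset := by
        intro a ha
        rw [List.mem_toFinset] at ha ⊢
        exact hsubset ha
      have h3 : ch.toFinset.card ≤ ch.length := List.toFinset_card_le ch
      have := Finset.card_le_card h2
      omega
  set F := fun ch => pvWinA dice ((dice.length : Int)) ch with hFdef
  -- A's wins array is the map of F over choices
  have hreplen : (PySem.List.pyRepeat [(0 : Int)] ((choices.length : Int))).length = 0 + choices.length := by
    rw [PySem.List.pyRepeat_singleton, List.length_replicate, Int.toNat_natCast]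
    omega
  have hwins := wins_eq_map F choices 0 (PySem.List.pyRepeat [(0 : Int)] ((choices.length : Int))) hreplen
  rw [Nat.cast_zero] at hwins
  rw [List.take_zero, List.nil_append] at hwins
  rw [hwins]
  -- B's fold is the running best of F
  have hbody : choices.foldl
      (fun best choice =>
        match best with
        | none => some (pvMerge (distB dice choice)
            (distB dice (rng.filter (fun i => !(choice.contains i)))) 0 0, choice)
        | some b => if pvMerge (distB dice choice)
            (distB dice (rng.filter (fun i => !(choice.contains i)))) 0 0 > b.1 then
            some (pvMerge (distB dice choice)
              (distB dice (rng.filter (fun i => !(choice.contains i)))) 0 0, choice)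
          else some b)
      (none : Option (Int × List Int))
      = choices.foldl (fun best ch => match best with
          | none => some (F ch, ch)
          | some b => if F ch > b.1 then some (F ch, ch) else some b)
        (none : Option (Int × List Int)) := by
    apply PySem.List.foldl_congr_mem
    intro acc x hx
    obtain ⟨hne, hcomp⟩ := hmem x hx
    have hw : pvMerge (distB dice x) (distB dice (rng.filter (fun i => !(x.contains i)))) 0 0 = F x := by
      rw [hFdef]
      have hww := (winA_eq_winB dice x hne (by rw [← hrngdef]; exact hcomp)).symm
      rw [PySem.List.len_eq] at hww
      rw [← hrngdef] at hww
      exact hww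
    rw [hw]
  rw [hbody]
  obtain ⟨e, hfold, hfm⟩ := runbest_spec F choices hchoices_ne
  rw [hfold]
  have hfmA := pickA_spec F choices hchoices_ne
  have := firstmax_unique F choices _ _ hfmA hfm
  rw [this]
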